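-- pv_equiv track=rewrite | github.com/LexHub-project/legifrance-bot | clean_article_html.py | clean_article_html
-- ===== SOURCE A (Python) =====
-- def clean_article_html(html: str, text_to_cid_to_anchor: dict[str, dict[str, str]]):
--     html = html.replace("<p></p>", "")
--
--     for text_cid, article_cid_to_anchor in text_to_cid_to_anchor.items():
--         for article_cid, anchor in article_cid_to_anchor.items():
--             look_for = f"/affichCodeArticle.do?cidTexte={article_cid}&idArticle={text_cid}&dateTexte=&categorieLien=cid"
--             replace = f"#{anchor}"
--
--             html = html.replace(look_for, replace)
--
--     return html
-- ===== SOURCE B (Python) =====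
-- def clean_article_html(html: str, text_to_cid_to_anchor: dict[str, dict[str, str]]):
--     # One left-to-right scan: parse each URL occurrence against the fixed template
--     # and look the (text_cid, article_cid) pair up in a dictionary built once.
--     PRE = "/affichCodeArticle.do?cidTexte="
--     MID = "&idArticle="
--     SUF = "&dateTexte=&categorieLien=cid"
--     anchors = {
--         (text_cid, article_cid): anchor
--         for text_cid, inner in text_to_cid_to_anchor.items()
--         for article_cid, anchor in inner.items()
--     }
--     s = html.replace("<p></p>", "")
--     out = []
--     i = 0
--     n = len(s)
--     while i < n:
--         if s.startswith(PRE, i):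
--             j = s.find(MID, i + len(PRE))
--             if j != -1:
--                 k = s.find(SUF, j + len(MID))
--                 if k != -1:
--                     a = anchors.get((s[j + len(MID):k], s[i + len(PRE):j]))
--                     if a is not None:
--                         out.append("#" + a)
--                         i = k + len(SUF)
--                         continue
--         out.append(s[i])
--         i += 1
--     return "".join(out)
-- ===== Notes on version B (the rewrite author's own statement) =====
-- stated objective: faster
-- what changed: B builds one (text_cid, article_cid) -> anchor dictionary and makes a single left-to-right scan of the html, parsing each occurrence of the fixed URL template and looking the parsed pair up, instead of A's nested dict loops that each run a full str.replace pass over the whole html.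
import Mathlib
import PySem

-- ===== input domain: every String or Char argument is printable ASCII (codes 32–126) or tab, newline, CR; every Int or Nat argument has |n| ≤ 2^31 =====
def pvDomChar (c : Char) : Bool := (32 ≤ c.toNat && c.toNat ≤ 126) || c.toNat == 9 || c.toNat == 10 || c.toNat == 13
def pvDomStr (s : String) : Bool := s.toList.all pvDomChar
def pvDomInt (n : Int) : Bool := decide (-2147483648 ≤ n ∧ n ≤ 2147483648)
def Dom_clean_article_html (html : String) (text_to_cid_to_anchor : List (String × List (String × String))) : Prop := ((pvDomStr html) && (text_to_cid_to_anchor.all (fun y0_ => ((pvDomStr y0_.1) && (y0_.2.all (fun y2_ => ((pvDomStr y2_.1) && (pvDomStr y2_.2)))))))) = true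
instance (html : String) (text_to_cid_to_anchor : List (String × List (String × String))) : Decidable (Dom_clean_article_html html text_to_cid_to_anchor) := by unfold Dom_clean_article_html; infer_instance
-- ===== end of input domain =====

-- B replaces A's one full replace pass per dictionary entry by ONE left-to-right scan of the
-- html that parses each URL against the fixed template and looks the pair up in a dictionary
-- built once (objective: faster).

-- ===== PORT A =====
-- The dict arguments are association lists; PySem.Dict.ofList rebuilds the Python dicts
-- (last value wins, first position kept) and .items is Python's .items() order.
def clean_article_html (html : String) (text_to_cid_to_anchor : List (String × List (String × String))) : String :=
  let html1 := PySem.Str.replace html "<p></p>" ""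
  (PySem.Dict.ofList text_to_cid_to_anchor).items.foldl
    (fun h tp =>
      (PySem.Dict.ofList tp.2).items.foldl
        (fun h2 ap =>
          PySem.Str.replace h2
            ("/affichCodeArticle.do?cidTexte=" ++ ap.1 ++ "&idArticle=" ++ tp.1 ++ "&dateTexte=&categorieLien=cid")
            ("#" ++ ap.2))
        h)
    html1

-- ===== PORT B =====
-- the three fixed pieces of the URL template (PRE, MID, SUF in Source B)
def pvPRE : List Char := "/affichCodeArticle.do?cidTexte=".toList
def pvMID : List Char := "&idArticle=".toList
def pvSUF : List Char := "&dateTexte=&categorieLien=cid".toList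

-- Source B's 'anchors' dict comprehension: (text_cid, article_cid) -> anchor
def pvAnchors (m : List (String × List (String × String))) : PySem.Dict (String × String) String :=
  PySem.Dict.ofList
    ((PySem.Dict.ofList m).items.flatMap (fun tp =>
      (PySem.Dict.ofList tp.2).items.map (fun ap => ((tp.1, ap.1), ap.2))))

-- Source B's while loop; the loop index i is represented by the remaining suffix of s,
-- so s.find(MID, i+len(PRE)) / the slices become find / take / drop on that suffix.
def pvScan (anchors : PySem.Dict (String × String) String) : List Char → List Char
  | [] => []
  | c :: t =>
    if PySem.Chars.startswith (c :: t) pvPRE then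
      let rest := (c :: t).drop pvPRE.length
      let j := PySem.Chars.find rest pvMID
      if j = -1 then c :: pvScan anchors t
      else
        let rest2 := rest.drop (j.toNat + pvMID.length)
        let k := PySem.Chars.find rest2 pvSUF
        if k = -1 then c :: pvScan anchors t
        else
          match anchors.get? (String.ofList (rest2.take k.toNat), String.ofList (rest.take j.toNat)) with
          | some a => ('#' :: a.toList) ++ pvScan anchors (rest2.drop (k.toNat + pvSUF.length))
          | none => c :: pvScan anchors t
    else c :: pvScan anchors t
termination_by s => s.length
decreasing_by
  all_goals have h31 : pvPRE.length = 31 := by decide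
  all_goals simp [List.length_drop]
  all_goals omega

def clean_article_html_alt (html : String) (text_to_cid_to_anchor : List (String × List (String × String))) : String :=
  String.ofList (pvScan (pvAnchors text_to_cid_to_anchor) (PySem.Str.replace html "<p></p>" "").toList)

-- ===== PRECONDITION & SPEC =====
def pvCleanId (x : String) : Bool := x.toList.all (fun ch => !(ch == '&' || ch == '/' || ch == '#'))
def pvCleanAnchor (x : String) : Bool := x.toList.all (fun ch => !(ch == '/'))
-- Pre_ admits every input whose cleaned html contains no occurrence of the fixed URL prefix
-- (then neither program replaces anything), and otherwise requires the ids and anchors to be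
-- clean: it excludes only inputs where some article/text cid contains '&', '/' or '#' or some
-- anchor contains '/' while the html really carries the URL prefix — there A's sequential
-- full-string replace passes can overlap or cascade and the outcome is an accident of the
-- order in which the rules happen to fire.
def Pre_clean_article_html (html : String) (text_to_cid_to_anchor : List (String × List (String × String))) : Prop :=
  (text_to_cid_to_anchor.all (fun tp =>
    pvCleanId tp.1 && tp.2.all (fun ap => pvCleanId ap.1 && pvCleanAnchor ap.2))) = true
  ∨ PySem.Str.isIn "/affichCodeArticle.do?cidTexte=" (PySem.Str.replace html "<p></p>" "") = false
instance (html : String) (text_to_cid_to_anchor : List (String × List (String × String))) : Decidable (Pre_clean_article_html html text_to_cid_to_anchor) := by unfold Pre_clean_article_html; infer_instance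

def pvWitness_clean_article_html : String × (List (String × List (String × String))) :=
  ("<p></p>a /affichCodeArticle.do?cidTexte=A1&idArticle=T1&dateTexte=&categorieLien=cid b",
   [("T1", [("A1", "art1")]), ("T2", [("A2", "art2")])])

def Spec_clean_article_html (html : String) (text_to_cid_to_anchor : List (String × List (String × String))) (out : String) : Prop := out = clean_article_html_alt html text_to_cid_to_anchor
instance (html : String) (text_to_cid_to_anchor : List (String × List (String × String))) (out : String) : Decidable (Spec_clean_article_html html text_to_cid_to_anchor out) := by unfold Spec_clean_article_html; infer_instance

-- ===== CLAIM (what is proved, stated in full; the proofs are below) =====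
def Claim_equal_clean_article_html : Prop := ∀ (html : String) (text_to_cid_to_anchor : List (String × List (String × String))), Dom_clean_article_html html text_to_cid_to_anchor → Pre_clean_article_html html text_to_cid_to_anchor → Spec_clean_article_html html text_to_cid_to_anchor (clean_article_html html text_to_cid_to_anchor)

-- ===== LEMMAS AND PROOFS =====

-- A's rule list, flattened, and its char-level replace step
def pvPat (tc ac : List Char) : List Char := pvPRE ++ ac ++ pvMID ++ tc ++ pvSUF
def pvRules (m : List (String × List (String × String))) : List (String × String × String) :=
  (PySem.Dict.ofList m).items.flatMap (fun tp =>
    (PySem.Dict.ofList tp.2).items.map (fun ap => (tp.1, ap.1, ap.2)))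
def pvStep (h : List Char) (r : String × String × String) : List Char :=
  PySem.Chars.replace h (pvPat r.1.toList r.2.1.toList) ('#' :: r.2.2.toList)

-- cleanliness of one rule, as the proofs use it
def pvCleanR (r : String × String × String) : Prop :=
  (∀ c ∈ r.1.toList, c ≠ '&' ∧ c ≠ '/' ∧ c ≠ '#') ∧
  (∀ c ∈ r.2.1.toList, c ≠ '&' ∧ c ≠ '/' ∧ c ≠ '#') ∧
  ('/' ∉ r.2.2.toList)

-- ===== splitOn machinery (pvSplitGoAcc/NeNil/Cur + pvReplaceGoEq proven in earlier work) =====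
lemma pvInterModify (new p x : List Char) (xs : List (List Char)) :
    new.intercalate ((p ++ x) :: xs) = p ++ new.intercalate (x :: xs) := by
  cases xs <;> simp [List.intercalate]

lemma pvSplitGoAcc (sep : List Char) : ∀ (fuel : Nat) (l cur acc),
    PySem.Chars.splitOn.go sep fuel l cur acc = acc.reverse ++ PySem.Chars.splitOn.go sep fuel l cur [] := by
  intro fuel
  induction fuel with
  | zero => intro l cur acc; simp [PySem.Chars.splitOn.go]
  | succ f ih =>
    intro l cur acc
    cases l with
    | nil => simp [PySem.Chars.splitOn.go]
    | cons c t =>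
      simp only [PySem.Chars.splitOn.go]
      split
      · rw [ih _ _ [cur.reverse], ih _ _ (cur.reverse :: acc)]; simp
      · exact ih _ _ _

lemma pvSplitGoNeNil (sep : List Char) : ∀ (fuel : Nat) (l cur acc),
    PySem.Chars.splitOn.go sep fuel l cur acc ≠ [] := by
  intro fuel
  induction fuel with
  | zero => intro l cur acc; simp [PySem.Chars.splitOn.go]
  | succ f ih =>
    intro l cur acc
    cases l with
    | nil => simp [PySem.Chars.splitOn.go]
    | cons c t =>
      simp only [PySem.Chars.splitOn.go]
      split
      · exact ih _ _ _
      · exact ih _ _ _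

lemma pvSplitGoCur (sep : List Char) : ∀ (fuel : Nat) (l cur),
    PySem.Chars.splitOn.go sep fuel l cur [] = (PySem.Chars.splitOn.go sep fuel l [] []).modifyHead (cur.reverse ++ ·) := by
  intro fuel
  induction fuel with
  | zero => intro l cur; simp [PySem.Chars.splitOn.go]
  | succ f ih =>
    intro l cur
    cases l with
    | nil => simp [PySem.Chars.splitOn.go]
    | cons c t =>
      simp only [PySem.Chars.splitOn.go]
      split
      · rw [pvSplitGoAcc sep f _ _ [cur.reverse], pvSplitGoAcc sep f _ _ [List.reverse []]]
        cases hg : PySem.Chars.splitOn.go sep f (List.drop sep.length (c::t)) [] [] with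
        | nil => exact absurd hg (pvSplitGoNeNil sep f _ _ _)
        | cons x xs => simp
      · rw [ih t (c :: cur), ih t [c]]
        cases hg : PySem.Chars.splitOn.go sep f t [] [] with
        | nil => exact absurd hg (pvSplitGoNeNil sep f _ _ _)
        | cons x xs => simp

lemma pvReplaceGoEq (old new : List Char) (hold : old ≠ []) : ∀ (fuel : Nat) (fuel' : Nat) (l : List Char) (acc : List Char), l.length ≤ fuel → l.length ≤ fuel' →
    PySem.Chars.replace.go old new fuel l acc = acc.reverse ++ PySem.Chars.join new (PySem.Chars.splitOn.go old fuel' l [] []) := by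
  have hlen : 1 ≤ old.length := List.length_pos_of_ne_nil hold
  intro fuel
  induction fuel with
  | zero =>
    intro fuel' l acc h1 h2
    have : l = [] := List.eq_nil_of_length_eq_zero (Nat.le_zero.mp h1)
    subst this
    cases fuel' <;> simp [PySem.Chars.replace.go, PySem.Chars.splitOn.go, PySem.Chars.join, List.intercalate]
  | succ f ih =>
    intro fuel' l acc h1 h2
    cases l with
    | nil => cases fuel' <;> simp [PySem.Chars.replace.go, PySem.Chars.splitOn.go, PySem.Chars.join, List.intercalate]
    | cons c t =>
      cases fuel' with
      | zero => simp at h2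
      | succ f' =>
        simp only [PySem.Chars.replace.go, PySem.Chars.splitOn.go]
        split
        · rename_i hpre
          have hdrop : (List.drop old.length (c :: t)).length ≤ f := by
            simp only [List.length_drop, List.length_cons] at *; omega
          have hdrop' : (List.drop old.length (c :: t)).length ≤ f' := by
            simp only [List.length_drop, List.length_cons] at *; omega
          rw [ih f' _ _ hdrop hdrop']
          rw [pvSplitGoAcc old f' _ _ [List.reverse []]]
          cases hg : PySem.Chars.splitOn.go old f' (List.drop old.length (c::t)) [] [] with
          | nil => exact absurd hg (pvSplitGoNeNil old f' _ _ _)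
          | cons x xs =>
            simp only [PySem.Chars.join, List.reverse_nil, List.reverse_cons, List.reverse_append]
            simp [List.intercalate]
        · rw [ih f' t (c :: acc) (by simpa using h1) (by simp at h2 ⊢; omega)]
          rw [pvSplitGoCur old f' t [c]]
          cases hg : PySem.Chars.splitOn.go old f' t [] [] with
          | nil => exact absurd hg (pvSplitGoNeNil old f' _ _ _)
          | cons x xs =>
            simp only [PySem.Chars.join, List.modifyHead, List.reverse_cons, List.reverse_nil,
              List.nil_append, List.append_assoc]
            simpa using (pvInterModify new [c] x xs).symm

lemma pvReplaceEqJoinSplit (s old new : List Char) (h : old ≠ []) :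
    PySem.Chars.replace s old new = PySem.Chars.join new (PySem.Chars.splitOn s old) := by
  have he : old.isEmpty = false := by simp [h]
  simp only [PySem.Chars.replace, PySem.Chars.splitOn, he, Bool.false_eq_true, if_false]
  simpa using pvReplaceGoEq old new h s.length (s.length + 1) s [] (le_refl _) (by omega)

-- ===== new: fuel irrelevance and structural splitOn lemmas =====
lemma pvGoFuel (sep : List Char) (hsep : sep ≠ []) : ∀ (f f' : Nat) (l cur acc), l.length ≤ f → l.length ≤ f' →
    PySem.Chars.splitOn.go sep f l cur acc = PySem.Chars.splitOn.go sep f' l cur acc := by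
  intro f
  induction f with
  | zero =>
    intro f' l cur acc h1 h2
    have : l = [] := List.eq_nil_of_length_eq_zero (Nat.le_zero.mp h1)
    subst this; cases f' <;> simp [PySem.Chars.splitOn.go]
  | succ f ih =>
    intro f' l cur acc h1 h2
    cases l with
    | nil => cases f' <;> simp [PySem.Chars.splitOn.go]
    | cons c t =>
      cases f' with
      | zero => simp at h2
      | succ g =>
        simp only [PySem.Chars.splitOn.go]
        have hlen : 1 ≤ sep.length := List.length_pos_of_ne_nil hsep
        split
        · apply ih
          · simp only [List.length_drop, List.length_cons] at *; omega
          · simp only [List.length_drop, List.length_cons] at *; omega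
        · apply ih
          · simpa using h1
          · simp at h2 ⊢; omega

lemma pvSplitOn_ne_nil (s sep : List Char) (_hsep : sep ≠ []) : PySem.Chars.splitOn s sep ≠ [] := by
  simp only [PySem.Chars.splitOn]
  exact pvSplitGoNeNil sep _ s [] []

lemma pvSplitOn_cons_nomatch (c : Char) (t sep : List Char) (hsep : sep ≠ [])
    (h : ¬ sep <+: (c :: t)) :
    PySem.Chars.splitOn (c :: t) sep = (PySem.Chars.splitOn t sep).modifyHead (c :: ·) := by
  have hb : sep.isPrefixOf (c :: t) = false := by
    rw [← Bool.not_eq_true, List.isPrefixOf_iff_prefix]; exact h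
  simp only [PySem.Chars.splitOn]
  simp only [PySem.Chars.splitOn.go, List.length_cons, hb, Bool.false_eq_true, if_false]
  rw [pvGoFuel sep hsep (t.length + 1) (t.length + 1) t [c] [] (by omega) (by omega)]
  rw [pvSplitGoCur sep (t.length + 1) t [c]]
  rfl

lemma pvSplitOn_head_match (v sep : List Char) (hsep : sep ≠ []) :
    PySem.Chars.splitOn (sep ++ v) sep = [] :: PySem.Chars.splitOn v sep := by
  cases sep with
  | nil => exact absurd rfl hsep
  | cons a sp =>
    have hb : (a :: sp).isPrefixOf ((a :: sp) ++ v) = true := by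
      rw [List.isPrefixOf_iff_prefix]; exact List.prefix_append _ _
    simp only [PySem.Chars.splitOn, List.cons_append] at hb ⊢
    simp only [PySem.Chars.splitOn.go, hb, if_true, List.length_cons]
    have hdl : List.drop (sp.length + 1) (a :: (sp ++ v)) = v := by
      have : sp.length + 1 = (a :: sp).length := by simp
      rw [this, ← List.cons_append]; exact List.drop_left
    rw [hdl]
    rw [pvSplitGoAcc _ _ _ _ [List.reverse []]]
    rw [pvGoFuel (a :: sp) hsep ((sp ++ v).length + 1) (v.length + 1) v [] [] (by simp; omega) (by omega)]
    simp

lemma pvGoHeadPrefix (sep : List Char) : ∀ (f : Nat) (l : List Char), l.length ≤ f →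
    ∀ (h : List Char) (rest : List (List Char)),
    PySem.Chars.splitOn.go sep f l [] [] = h :: rest → h <+: l := by
  intro f
  induction f with
  | zero =>
    intro l hl h rest heq
    have : l = [] := List.eq_nil_of_length_eq_zero (Nat.le_zero.mp hl)
    subst this
    simp [PySem.Chars.splitOn.go] at heq
    simp [heq.1]
  | succ f ih =>
    intro l hl h rest heq
    cases l with
    | nil =>
      simp [PySem.Chars.splitOn.go] at heq
      simp [heq.1]
    | cons c t =>
      simp only [PySem.Chars.splitOn.go] at heq
      by_cases hp : sep.isPrefixOf (c :: t) = true
      · rw [if_pos hp] at heq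
        rw [pvSplitGoAcc sep f _ _ [List.reverse []]] at heq
        cases hg : PySem.Chars.splitOn.go sep f (List.drop sep.length (c :: t)) [] [] with
        | nil => exact absurd hg (pvSplitGoNeNil sep f _ _ _)
        | cons x xs =>
          rw [hg] at heq
          simp only [List.reverse_singleton, List.reverse_nil, List.singleton_append,
            List.cons.injEq] at heq
          rw [← heq.1]
          exact List.nil_prefix
      · rw [if_neg hp] at heq
        rw [pvSplitGoCur sep f t [c]] at heq
        cases hg : PySem.Chars.splitOn.go sep f t [] [] with
        | nil => exact absurd hg (pvSplitGoNeNil sep f _ _ _)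
        | cons x xs =>
          rw [hg] at heq
          simp only [List.modifyHead, List.reverse_cons, List.reverse_nil, List.nil_append,
            List.cons.injEq] at heq
          have hx : x <+: t := ih t (by simpa using hl) x xs hg
          rw [← heq.1]
          simpa using hx

lemma pvSplitOn_head_prefix (s sep : List Char) (h : List Char) (rest : List (List Char))
    (heq : PySem.Chars.splitOn s sep = h :: rest) : h <+: s := by
  simp only [PySem.Chars.splitOn] at heq
  exact pvGoHeadPrefix sep (s.length + 1) s (by omega) h rest heq

lemma pvGoRoundtrip (sep : List Char) (hsep : sep ≠ []) : ∀ (f : Nat) (l cur : List Char), l.length ≤ f →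
    sep.intercalate (PySem.Chars.splitOn.go sep f l cur []) = cur.reverse ++ l := by
  have hlen : 1 ≤ sep.length := List.length_pos_of_ne_nil hsep
  intro f
  induction f with
  | zero =>
    intro l cur hl
    have : l = [] := List.eq_nil_of_length_eq_zero (Nat.le_zero.mp hl)
    subst this
    simp [PySem.Chars.splitOn.go, List.intercalate]
  | succ f ih =>
    intro l cur hl
    cases l with
    | nil => simp [PySem.Chars.splitOn.go, List.intercalate]
    | cons c t =>
      simp only [PySem.Chars.splitOn.go]
      by_cases hp : sep.isPrefixOf (c :: t) = true
      · rw [if_pos hp]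
        rw [pvSplitGoAcc sep f _ _ [cur.reverse]]
        have hdrop : (List.drop sep.length (c :: t)).length ≤ f := by
          simp only [List.length_drop, List.length_cons] at *; omega
        cases hg : PySem.Chars.splitOn.go sep f (List.drop sep.length (c :: t)) [] [] with
        | nil => exact absurd hg (pvSplitGoNeNil sep f _ _ _)
        | cons x xs =>
          have hih := ih (List.drop sep.length (c :: t)) [] hdrop
          rw [hg] at hih
          simp only [List.reverse_nil, List.nil_append] at hih
          have hcc : sep.intercalate (cur.reverse :: x :: xs) = cur.reverse ++ sep ++ sep.intercalate (x :: xs) := by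
            simp [List.intercalate]
          rw [List.reverse_singleton, List.singleton_append, hcc, hih]
          obtain ⟨u, hu⟩ := List.isPrefixOf_iff_prefix.mp hp
          have hdu : List.drop sep.length (c :: t) = u := by rw [← hu]; exact List.drop_left
          rw [hdu, List.append_assoc, hu]
      · rw [if_neg hp]
        have := ih t (c :: cur) (by simpa using hl)
        rw [this]; simp

lemma pvSplitOn_roundtrip (s sep : List Char) (hsep : sep ≠ []) :
    sep.intercalate (PySem.Chars.splitOn s sep) = s := by
  simp only [PySem.Chars.splitOn]
  simpa using pvGoRoundtrip sep hsep (s.length + 1) s [] (by omega)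

-- ===== replace-level structural lemmas =====
lemma pvReplace_nil (p r : List Char) (hp : p ≠ []) : PySem.Chars.replace [] p r = [] := by
  have he : p.isEmpty = false := by simp [hp]
  simp [PySem.Chars.replace, he, PySem.Chars.replace.go]

lemma pvReplace_cons_nomatch (c : Char) (t p r : List Char) (hp : p ≠ [])
    (h : ¬ p <+: (c :: t)) :
    PySem.Chars.replace (c :: t) p r = c :: PySem.Chars.replace t p r := by
  rw [pvReplaceEqJoinSplit _ _ _ hp, pvReplaceEqJoinSplit _ _ _ hp]
  rw [pvSplitOn_cons_nomatch c t p hp h]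
  cases hg : PySem.Chars.splitOn t p with
  | nil => exact absurd hg (pvSplitOn_ne_nil t p hp)
  | cons x xs =>
    simp only [List.modifyHead, PySem.Chars.join]
    simpa using pvInterModify r [c] x xs

lemma pvReplace_head_match (v p r : List Char) (hp : p ≠ []) :
    PySem.Chars.replace (p ++ v) p r = r ++ PySem.Chars.replace v p r := by
  rw [pvReplaceEqJoinSplit _ _ _ hp, pvReplaceEqJoinSplit _ _ _ hp]
  rw [pvSplitOn_head_match v p hp]
  cases hg : PySem.Chars.splitOn v p with
  | nil => exact absurd hg (pvSplitOn_ne_nil v p hp)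
  | cons x xs => simp [PySem.Chars.join, List.intercalate]

lemma pvReplace_append_nostart (u v p r : List Char) (hp : p ≠ [])
    (h : ∀ i < u.length, ¬ p <+: List.drop i (u ++ v)) :
    PySem.Chars.replace (u ++ v) p r = u ++ PySem.Chars.replace v p r := by
  induction u with
  | nil => simp
  | cons c u' ih =>
    have h0 : ¬ p <+: (c :: (u' ++ v)) := by simpa using h 0 (by simp)
    rw [List.cons_append, pvReplace_cons_nomatch c (u' ++ v) p r hp h0]
    rw [ih (fun i hi => by simpa using h (i + 1) (by simpa using hi))]
    rfl

-- a replacement that inserts '#'-headed text cannot create a '#'-free pattern at the front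
lemma pvNewOcc (c : Char) (t P sep a : List Char) (hPh : '#' ∉ P) (hsep : sep ≠ [])
    (hno : ¬ P <+: (c :: t)) :
    ¬ P <+: (c :: PySem.Chars.replace t sep ('#' :: a)) := by
  intro hyp
  rw [pvReplaceEqJoinSplit _ _ _ hsep] at hyp
  cases hg : PySem.Chars.splitOn t sep with
  | nil => exact absurd hg (pvSplitOn_ne_nil t sep hsep)
  | cons h rest =>
    have hhp : h <+: t := pvSplitOn_head_prefix t sep h rest hg
    rw [hg] at hyp
    cases rest with
    | nil =>
      have hr : sep.intercalate (PySem.Chars.splitOn t sep) = t := pvSplitOn_roundtrip t sep hsep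
      rw [hg] at hr
      simp [List.intercalate] at hr
      have hj : PySem.Chars.join ('#' :: a) [h] = h := by simp [PySem.Chars.join, List.intercalate]
      rw [hj] at hyp
      exact hno (hr ▸ hyp)
    | cons x xs =>
      have hcc : PySem.Chars.join ('#' :: a) (h :: x :: xs)
          = h ++ '#' :: (a ++ ('#' :: a).intercalate (x :: xs)) := by
        simp [PySem.Chars.join, List.intercalate]
      rw [hcc] at hyp
      have hz : (c :: (h ++ '#' :: (a ++ ('#' :: a).intercalate (x :: xs))))
          = (c :: h) ++ ('#' :: (a ++ ('#' :: a).intercalate (x :: xs))) := by simp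
      rw [hz] at hyp
      by_cases hl : P.length ≤ (c :: h).length
      · have hch : (c :: h) <+: (c :: h) ++ ('#' :: (a ++ ('#' :: a).intercalate (x :: xs))) :=
          List.prefix_append _ _
        have hPch : P <+: (c :: h) := List.prefix_of_prefix_length_le hyp hch hl
        have : P <+: (c :: t) := hPch.trans (List.cons_prefix_cons.mpr ⟨rfl, hhp⟩)
        exact hno this
      · rw [not_le] at hl
        have hi : (c :: h).length < ((c :: h) ++ ('#' :: (a ++ ('#' :: a).intercalate (x :: xs)))).length := by
          simp
        have hgetP := hyp.getElem (i := (c :: h).length) (by omega)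
        have hgetz : ((c :: h) ++ ('#' :: (a ++ ('#' :: a).intercalate (x :: xs))))[(c :: h).length]'hi = '#' := by
          rw [List.getElem_append_right (le_refl _)]
          simp
        have hfin := hgetP.trans hgetz
        exact hPh (hfin ▸ List.getElem_mem _)


-- ===== template-shape lemmas =====
def pvPREt : List Char := "affichCodeArticle.do?cidTexte=".toList
def pvMIDt : List Char := "idArticle=".toList
def pvSUFt : List Char := "dateTexte=&categorieLien=cid".toList

lemma pvPRE_eq : pvPRE = '/' :: pvPREt := by decide
lemma pvMID_eq : pvMID = '&' :: pvMIDt := by decide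
lemma pvSUF_eq : pvSUF = '&' :: pvSUFt := by decide

lemma pvPat_cons (tc ac : List Char) :
    pvPat tc ac = '/' :: (pvPREt ++ ac ++ pvMID ++ tc ++ pvSUF) := by
  simp [pvPat, pvPRE_eq]

-- the tail of a clean pattern contains no '/'
lemma pvPat_tail_no_slash (tc ac : List Char)
    (htc : ∀ c ∈ tc, c ≠ '&' ∧ c ≠ '/' ∧ c ≠ '#') (hac : ∀ c ∈ ac, c ≠ '&' ∧ c ≠ '/' ∧ c ≠ '#') :
    '/' ∉ (pvPREt ++ ac ++ pvMID ++ tc ++ pvSUF) := by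
  intro hmem
  simp only [List.mem_append] at hmem
  rcases hmem with (((h | h) | h) | h) | h
  · exact absurd h (by decide)
  · exact (hac '/' h).2.1 rfl
  · exact absurd h (by decide)
  · exact (htc '/' h).2.1 rfl
  · exact absurd h (by decide)

lemma pvPat_no_hash (tc ac : List Char)
    (htc : ∀ c ∈ tc, c ≠ '&' ∧ c ≠ '/' ∧ c ≠ '#') (hac : ∀ c ∈ ac, c ≠ '&' ∧ c ≠ '/' ∧ c ≠ '#') :
    '#' ∉ pvPat tc ac := by
  intro hmem
  simp only [pvPat, List.mem_append] at hmem
  rcases hmem with (((h | h) | h) | h) | h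
  · exact absurd h (by decide)
  · exact (hac '#' h).2.2 rfl
  · exact absurd h (by decide)
  · exact (htc '#' h).2.2 rfl
  · exact absurd h (by decide)

lemma pvPat_ne_nil (tc ac : List Char) : pvPat tc ac ≠ [] := by
  rw [pvPat_cons]; exact List.cons_ne_nil _ _

-- first-'&' alignment: an amp-free block followed by '&' is rigid under prefix
lemma pvAmpFirst (x1 : List Char) : ∀ (x2 u1 u2 : List Char), '&' ∉ x1 → '&' ∉ x2 →
    (x1 ++ '&' :: u1) <+: (x2 ++ '&' :: u2) → x1 = x2 ∧ u1 <+: u2 := by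
  induction x1 with
  | nil =>
    intro x2 u1 u2 _ h2 hp
    cases x2 with
    | nil =>
      simp only [List.nil_append, List.cons_prefix_cons] at hp
      exact ⟨rfl, hp.2⟩
    | cons d x2' =>
      simp only [List.nil_append, List.cons_append, List.cons_prefix_cons] at hp
      exact (h2 (by simp [← hp.1])).elim
  | cons c x1' ih =>
    intro x2 u1 u2 h1 h2 hp
    cases x2 with
    | nil =>
      simp only [List.cons_append, List.nil_append, List.cons_prefix_cons] at hp
      exact (h1 (by simp [hp.1])).elim
    | cons d x2' =>
      simp only [List.cons_append, List.cons_prefix_cons] at hp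
      obtain ⟨rfl, hp'⟩ := hp
      obtain ⟨rfl, hu⟩ := ih x2' u1 u2 (fun hm => h1 (List.mem_cons_of_mem _ hm))
        (fun hm => h2 (List.mem_cons_of_mem _ hm)) hp'
      exact ⟨rfl, hu⟩

lemma pvPat_prefix_pat (t1 a1 t2 a2 : List Char)
    (h1 : '&' ∉ t1) (h2 : '&' ∉ a1) (h3 : '&' ∉ t2) (h4 : '&' ∉ a2)
    (hp : pvPat t1 a1 <+: pvPat t2 a2) : t1 = t2 ∧ a1 = a2 := by
  simp only [pvPat, List.append_assoc] at hp
  rw [List.prefix_append_right_inj] at hp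
  rw [pvMID_eq] at hp
  simp only [List.cons_append] at hp
  obtain ⟨rfl, hp'⟩ := pvAmpFirst a1 a2 _ _ h2 h4 (by simpa using hp)
  rw [List.prefix_append_right_inj] at hp'
  rw [pvSUF_eq] at hp'
  obtain ⟨rfl, _⟩ := pvAmpFirst t1 t2 _ _ h1 h3 hp'
  exact ⟨rfl, rfl⟩

lemma pvPat_prefix_unique (s t1 a1 t2 a2 : List Char)
    (h1 : '&' ∉ t1) (h2 : '&' ∉ a1) (h3 : '&' ∉ t2) (h4 : '&' ∉ a2)
    (hp1 : pvPat t1 a1 <+: s) (hp2 : pvPat t2 a2 <+: s) : t1 = t2 ∧ a1 = a2 := by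
  rcases List.prefix_or_prefix_of_prefix hp1 hp2 with h | h
  · exact pvPat_prefix_pat t1 a1 t2 a2 h1 h2 h3 h4 h
  · obtain ⟨ht, ha⟩ := pvPat_prefix_pat t2 a2 t1 a1 h3 h4 h1 h2 h
    exact ⟨ht.symm, ha.symm⟩

-- a '/'-headed pattern cannot start strictly inside a clean pattern
lemma pvNoStartInside (tc ac v : List Char)
    (htc : ∀ c ∈ tc, c ≠ '&' ∧ c ≠ '/' ∧ c ≠ '#') (hac : ∀ c ∈ ac, c ≠ '&' ∧ c ≠ '/' ∧ c ≠ '#')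
    (p : List Char) (pt : List Char) (hph : p = '/' :: pt)
    (h0 : ¬ p <+: (pvPat tc ac ++ v)) :
    ∀ i < (pvPat tc ac).length, ¬ p <+: List.drop i (pvPat tc ac ++ v) := by
  intro i hi hp
  rcases Nat.eq_zero_or_pos i with rfl | hipos
  · exact h0 (by simpa using hp)
  · have hhead : (List.drop i (pvPat tc ac ++ v)).head? = some '/' := by
      rcases hp with ⟨w, hw⟩
      rw [← hw, hph]; rfl
    rw [List.head?_drop] at hhead
    have hgete : (pvPat tc ac ++ v)[i]? = (pvPat tc ac)[i]? := by
      rw [List.getElem?_append_left hi]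
    rw [hgete] at hhead
    obtain ⟨i', rfl⟩ : ∃ i', i = i' + 1 := ⟨i - 1, by omega⟩
    rw [pvPat_cons, List.getElem?_cons_succ] at hhead
    exact pvPat_tail_no_slash tc ac htc hac (List.mem_of_getElem? hhead)

-- cleanliness unpacked
lemma pvCleanR_ampT {r : String × String × String} (h : pvCleanR r) : '&' ∉ r.1.toList :=
  fun hm => (h.1 '&' hm).1 rfl
lemma pvCleanR_ampA {r : String × String × String} (h : pvCleanR r) : '&' ∉ r.2.1.toList :=
  fun hm => (h.2.1 '&' hm).1 rfl
lemma pvCleanR_repNoSlash {r : String × String × String} (h : pvCleanR r) :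
    '/' ∉ ('#' :: r.2.2.toList) := by
  intro hm
  rcases List.mem_cons.mp hm with h' | h'
  · exact absurd h' (by decide)
  · exact h.2.2 h'

lemma pvSlashHead {a : Char} (p pt w : List Char) (hph : p = a :: pt) (i : Nat)
    (hp : p <+: List.drop i w) : w[i]? = some a := by
  rcases hp with ⟨z, hz⟩
  rw [← List.head?_drop, ← hz, hph]
  rfl

-- same (tc, ac) key forces the same rule inside a Nodup-keyed rule list
lemma pvKeyEq {r r' : String × String × String}
    (ht : r.1.toList = r'.1.toList) (ha : r.2.1.toList = r'.2.1.toList) :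
    (r.1, r.2.1) = (r'.1, r'.2.1) := by
  have h1 : r.1 = r'.1 := by
    have := congrArg String.ofList ht; simpa [String.ofList_toList] using this
  have h2 : r.2.1 = r'.2.1 := by
    have := congrArg String.ofList ha; simpa [String.ofList_toList] using this
  rw [h1, h2]

-- ===== A-side: the fold of replaces, peeled at the front =====
lemma pvFold_nil (L : List (String × String × String)) :
    List.foldl pvStep [] L = [] := by
  induction L with
  | nil => rfl
  | cons r L' ih =>
    simp only [List.foldl_cons, pvStep]
    rw [pvReplace_nil _ _ (pvPat_ne_nil _ _)]
    exact ih

lemma pvFold_inert (L : List (String × String × String)) (hcl : ∀ r ∈ L, pvCleanR r)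
    (u : List Char) (hu : '/' ∉ u) : ∀ (w : List Char),
    List.foldl pvStep (u ++ w) L = u ++ List.foldl pvStep w L := by
  induction L with
  | nil => intro w; rfl
  | cons r L' ih =>
    intro w
    have hstep : pvStep (u ++ w) r = u ++ pvStep w r := by
      unfold pvStep
      apply pvReplace_append_nostart _ _ _ _ (pvPat_ne_nil _ _)
      intro i hi hp
      have := pvSlashHead _ _ _ (pvPat_cons r.1.toList r.2.1.toList) i hp
      rw [List.getElem?_append_left hi, List.getElem?_eq_getElem hi] at this
      exact hu ((Option.some_inj.mp this) ▸ List.getElem_mem _)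
    simp only [List.foldl_cons, hstep]
    exact ih (fun r hr => hcl r (List.mem_cons_of_mem _ hr)) (pvStep w r)

lemma pvFold_match (L : List (String × String × String)) (hcl : ∀ r ∈ L, pvCleanR r)
    (hnd : (L.map (fun r => (r.1, r.2.1))).Nodup)
    (r : String × String × String) (hr : r ∈ L) : ∀ (v : List Char),
    List.foldl pvStep (pvPat r.1.toList r.2.1.toList ++ v) L
      = ('#' :: r.2.2.toList) ++ List.foldl pvStep v L := by
  induction L with
  | nil => exact absurd hr (List.not_mem_nil)
  | cons r' L' ih =>
    intro v
    have hclr := hcl r hr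
    have hclr' := hcl r' List.mem_cons_self
    by_cases hrr : r' = r
    · subst hrr
      simp only [List.foldl_cons, pvStep]
      rw [pvReplace_head_match _ _ _ (pvPat_ne_nil _ _)]
      exact pvFold_inert L' (fun q hq => hcl q (List.mem_cons_of_mem _ hq)) _
        (pvCleanR_repNoSlash hclr') _
    · have hrL' : r ∈ L' := by
        rcases List.mem_cons.mp hr with h | h
        · exact absurd h.symm hrr
        · exact h
      have hnom : ¬ pvPat r'.1.toList r'.2.1.toList <+: (pvPat r.1.toList r.2.1.toList ++ v) := by
        intro hpfx
        obtain ⟨ht, ha⟩ := pvPat_prefix_unique _ _ _ _ _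
          (pvCleanR_ampT hclr') (pvCleanR_ampA hclr') (pvCleanR_ampT hclr) (pvCleanR_ampA hclr)
          hpfx (List.prefix_append _ _)
        have hkey := pvKeyEq ht ha
        have : (r.1, r.2.1) ∈ L'.map (fun q => (q.1, q.2.1)) :=
          List.mem_map.mpr ⟨r, hrL', rfl⟩
        rw [← hkey] at this
        exact (List.nodup_cons.mp hnd).1 this
      have hstep : pvStep (pvPat r.1.toList r.2.1.toList ++ v) r'
          = pvPat r.1.toList r.2.1.toList ++ pvStep v r' := by
        unfold pvStep
        apply pvReplace_append_nostart _ _ _ _ (pvPat_ne_nil _ _)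
        exact pvNoStartInside _ _ _ hclr.1 hclr.2.1 _ _
          (pvPat_cons r'.1.toList r'.2.1.toList) hnom
      simp only [List.foldl_cons, hstep]
      exact ih (fun q hq => hcl q (List.mem_cons_of_mem _ hq)) (List.nodup_cons.mp hnd).2
        hrL' (pvStep v r')

lemma pvFold_nomatch (L : List (String × String × String)) (hcl : ∀ r ∈ L, pvCleanR r)
    (c : Char) : ∀ (t : List Char),
    (∀ r ∈ L, ¬ pvPat r.1.toList r.2.1.toList <+: (c :: t)) →
    List.foldl pvStep (c :: t) L = c :: List.foldl pvStep t L := by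
  induction L with
  | nil => intro t _; rfl
  | cons r' L' ih =>
    intro t hno
    have hstep : pvStep (c :: t) r' = c :: pvStep t r' := by
      unfold pvStep
      exact pvReplace_cons_nomatch _ _ _ _ (pvPat_ne_nil _ _) (hno r' List.mem_cons_self)
    simp only [List.foldl_cons, hstep]
    refine ih (fun q hq => hcl q (List.mem_cons_of_mem _ hq)) (pvStep t r') ?_
    intro q hq
    have hclq := hcl q (List.mem_cons_of_mem _ hq)
    unfold pvStep
    exact pvNewOcc c t _ _ _ (pvPat_no_hash _ _ hclq.1 hclq.2.1) (pvPat_ne_nil _ _)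
      (hno q (List.mem_cons_of_mem _ hq))

-- ===== B-side: find against the template, and the scanner peeled at the front =====
lemma pvSubAt (l sub : List Char) (i : Nat) (hp : sub <+: List.drop i l) :
    l = List.take i l ++ sub ++ List.drop (i + sub.length) l := by
  obtain ⟨z, hz⟩ := hp
  have hzd : z = List.drop (i + sub.length) l := by
    have : List.drop sub.length (List.drop i l) = z := by rw [← hz]; exact List.drop_left
    rw [← this, List.drop_drop]
  rw [← hzd, List.append_assoc, hz, List.take_append_drop]

lemma pvFindAt (x n w : List Char) (hx : '&' ∉ x) (nt : List Char) (hn : n = '&' :: nt) :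
    PySem.Chars.find (x ++ n ++ w) n = (x.length : Int) := by
  have hocc : n <+: List.drop x.length (x ++ n ++ w) := by
    rw [List.append_assoc, List.drop_left]
    exact List.prefix_append _ _
  have hnn : PySem.Chars.find (x ++ n ++ w) n ≠ -1 :=
    (PySem.Chars.find_ne_neg_one_iff _ _).mpr ⟨x, w, by rw [List.append_assoc]⟩
  have hge : 0 ≤ PySem.Chars.find (x ++ n ++ w) n := by
    have := PySem.Chars.neg_one_le_find (x ++ n ++ w) n
    omega
  obtain ⟨hpfx, hmin⟩ := PySem.Chars.find_spec hge
  set f := (PySem.Chars.find (x ++ n ++ w) n).toNat with hf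
  have hle : f ≤ x.length := by
    by_contra hgt
    exact hmin x.length (by omega) hocc
  have hnlt : ¬ f < x.length := by
    intro hlt
    have hh := pvSlashHead n nt _ hn f hpfx
    rw [List.append_assoc, List.getElem?_append_left hlt, List.getElem?_eq_getElem hlt] at hh
    exact hx ((Option.some_inj.mp hh) ▸ List.getElem_mem _)
  have : f = x.length := by omega
  omega

lemma pvScan_cons (anch : PySem.Dict (String × String) String) (c : Char) (t : List Char) :
    pvScan anch (c :: t) =
    if PySem.Chars.startswith (c :: t) pvPRE then
      let rest := (c :: t).drop pvPRE.length
      let j := PySem.Chars.find rest pvMID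
      if j = -1 then c :: pvScan anch t
      else
        let rest2 := rest.drop (j.toNat + pvMID.length)
        let k := PySem.Chars.find rest2 pvSUF
        if k = -1 then c :: pvScan anch t
        else
          match anch.get? (String.ofList (rest2.take k.toNat), String.ofList (rest.take j.toNat)) with
          | some a => ('#' :: a.toList) ++ pvScan anch (rest2.drop (k.toNat + pvSUF.length))
          | none => c :: pvScan anch t
    else c :: pvScan anch t := by
  rw [pvScan]

lemma pvScan_match (anch : PySem.Dict (String × String) String) (tc ac a : String)
    (htc : '&' ∉ tc.toList) (hac : '&' ∉ ac.toList)
    (hget : anch.get? (tc, ac) = some a) (v : List Char) :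
    pvScan anch (pvPat tc.toList ac.toList ++ v) = ('#' :: a.toList) ++ pvScan anch v := by
  have hshape : pvPat tc.toList ac.toList ++ v
      = '/' :: (pvPREt ++ ac.toList ++ pvMID ++ tc.toList ++ pvSUF ++ v) := by
    rw [pvPat_cons]; rfl
  rw [hshape, pvScan_cons]
  have hstart : PySem.Chars.startswith
      ('/' :: (pvPREt ++ ac.toList ++ pvMID ++ tc.toList ++ pvSUF ++ v)) pvPRE = true := by
    rw [PySem.Chars.startswith_iff, ← hshape]
    simp only [pvPat, List.append_assoc]
    exact List.prefix_append _ _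
  rw [if_pos hstart]
  have hdrop : ('/' :: (pvPREt ++ ac.toList ++ pvMID ++ tc.toList ++ pvSUF ++ v)).drop pvPRE.length
      = ac.toList ++ pvMID ++ (tc.toList ++ pvSUF ++ v) := by
    rw [← hshape]
    have h2 : pvPat tc.toList ac.toList ++ v
        = pvPRE ++ (ac.toList ++ pvMID ++ (tc.toList ++ pvSUF ++ v)) := by
      simp [pvPat, List.append_assoc]
    rw [h2, List.drop_left]
  have hj : PySem.Chars.find (ac.toList ++ pvMID ++ (tc.toList ++ pvSUF ++ v)) pvMID
      = (ac.toList.length : Int) := pvFindAt _ _ _ hac pvMIDt pvMID_eq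
  have hk : PySem.Chars.find (tc.toList ++ pvSUF ++ v) pvSUF = (tc.toList.length : Int) :=
    pvFindAt _ _ _ htc pvSUFt pvSUF_eq
  have hdrop2 : (ac.toList ++ pvMID ++ (tc.toList ++ pvSUF ++ v)).drop (ac.toList.length + pvMID.length)
      = tc.toList ++ pvSUF ++ v := by
    rw [← List.length_append]
    exact List.drop_left
  have htake2 : (tc.toList ++ pvSUF ++ v).take tc.toList.length = tc.toList := by
    rw [List.append_assoc]; exact List.take_left
  have htake1 : (ac.toList ++ pvMID ++ (tc.toList ++ pvSUF ++ v)).take ac.toList.length = ac.toList := by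
    rw [List.append_assoc]; exact List.take_left
  have hdrop3 : (tc.toList ++ pvSUF ++ v).drop (tc.toList.length + pvSUF.length) = v := by
    rw [← List.length_append, List.append_assoc (tc.toList) pvSUF v, ← List.append_assoc]
    exact List.drop_left
  have hjne : ¬ ((ac.toList.length : Int) = -1) := by omega
  have hkne : ¬ ((tc.toList.length : Int) = -1) := by omega
  simp only [hdrop, hj, hjne, if_false, Int.toNat_natCast, hdrop2, hk, hkne, htake2, htake1,
    String.ofList_toList, hget, hdrop3]

lemma pvScan_nomatch (anch : PySem.Dict (String × String) String)
    (L : List (String × String × String))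
    (hanch : ∀ (tc ac a : String), anch.get? (tc, ac) = some a → (tc, ac, a) ∈ L)
    (c : Char) (t : List Char)
    (hno : ∀ r ∈ L, ¬ pvPat r.1.toList r.2.1.toList <+: (c :: t)) :
    pvScan anch (c :: t) = c :: pvScan anch t := by
  rw [pvScan_cons]
  by_cases hstart : PySem.Chars.startswith (c :: t) pvPRE = true
  swap
  · rw [if_neg hstart]
  rw [if_pos hstart]
  have hpre : pvPRE <+: (c :: t) := (PySem.Chars.startswith_iff _ _).mp hstart
  have hrest : (c :: t) = pvPRE ++ (c :: t).drop pvPRE.length := by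
    obtain ⟨z, hz⟩ := hpre
    rw [← hz, List.drop_left]
  set rest := (c :: t).drop pvPRE.length with hrestdef
  by_cases hj : PySem.Chars.find rest pvMID = -1
  · simp [hj]
  rw [if_neg hj]
  have hj0 : 0 ≤ PySem.Chars.find rest pvMID := by
    have := PySem.Chars.neg_one_le_find rest pvMID
    omega
  obtain ⟨hjp, _⟩ := PySem.Chars.find_spec hj0
  set j := (PySem.Chars.find rest pvMID).toNat with hjdef
  have hrsplit : rest = rest.take j ++ pvMID ++ List.drop (j + pvMID.length) rest := pvSubAt rest pvMID j hjp
  set rest2 := rest.drop (j + pvMID.length) with hrest2def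
  by_cases hk : PySem.Chars.find rest2 pvSUF = -1
  · simp [hk]
  rw [if_neg hk]
  have hk0 : 0 ≤ PySem.Chars.find rest2 pvSUF := by
    have := PySem.Chars.neg_one_le_find rest2 pvSUF
    omega
  obtain ⟨hkp, _⟩ := PySem.Chars.find_spec hk0
  set k := (PySem.Chars.find rest2 pvSUF).toNat with hkdef
  have hr2split : rest2 = rest2.take k ++ pvSUF ++ List.drop (k + pvSUF.length) rest2 := pvSubAt rest2 pvSUF k hkp
  cases hget : anch.get? (String.ofList (rest2.take k), String.ofList (rest.take j)) with
  | none => rfl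
  | some a =>
    exfalso
    have hmem := hanch _ _ _ hget
    apply hno _ hmem
    show pvPat (String.ofList (rest2.take k)).toList (String.ofList (rest.take j)).toList <+: (c :: t)
    rw [String.toList_ofList, String.toList_ofList]
    refine ⟨List.drop (k + pvSUF.length) rest2, ?_⟩
    rw [pvPat]
    conv_rhs => rw [hrest]
    conv_rhs => rw [hrsplit]
    conv_rhs => rw [hr2split]
    simp [List.append_assoc]

-- ===== the anchors dictionary vs the flat rule list =====
def pvPairs (L : List (String × String × String)) : List ((String × String) × String) :=
  L.map (fun r => ((r.1, r.2.1), r.2.2))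

lemma pvPairsFst (L : List (String × String × String)) :
    (pvPairs L).map Prod.fst = L.map (fun r => (r.1, r.2.1)) := by
  simp only [pvPairs, List.map_map]
  rfl

lemma pvAnchors_eq (m : List (String × List (String × String))) :
    pvAnchors m = PySem.Dict.ofList (pvPairs (pvRules m)) := by
  unfold pvAnchors pvRules pvPairs
  rw [List.map_flatMap]
  simp only [List.map_map]
  rfl

lemma pvItems_ofList (ps : List ((String × String) × String)) (hnd : (ps.map Prod.fst).Nodup) :
    (PySem.Dict.ofList ps).items = ps := by
  have h := PySem.Dict.items_foldl_insert_fresh ps Prod.fst Prod.snd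
    (PySem.Dict.empty : PySem.Dict (String × String) String)
    (fun a _ => PySem.Dict.contains_empty _) hnd
  have hfold : (PySem.Dict.ofList ps : PySem.Dict (String × String) String)
      = List.foldl (fun d a => d.insert a.1 a.2) PySem.Dict.empty ps := rfl
  rw [hfold, h]
  simp [show (PySem.Dict.empty : PySem.Dict (String × String) String).items = [] from rfl]

lemma pvLook1 (L : List (String × String × String))
    (hnd : (L.map (fun r => (r.1, r.2.1))).Nodup)
    (r : String × String × String) (hr : r ∈ L) :
    (PySem.Dict.ofList (pvPairs L)).get? (r.1, r.2.1) = some r.2.2 := by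
  apply PySem.Dict.get?_of_mem_items
  · rw [pvItems_ofList _ (by rw [pvPairsFst]; exact hnd)]
    exact List.mem_map.mpr ⟨r, hr, rfl⟩
  · exact PySem.Dict.nodup_keys_ofList _

lemma pvLook2 (L : List (String × String × String))
    (hnd : (L.map (fun r => (r.1, r.2.1))).Nodup)
    (tc ac a : String)
    (h : (PySem.Dict.ofList (pvPairs L)).get? (tc, ac) = some a) : (tc, ac, a) ∈ L := by
  rw [PySem.Dict.get?_eq_some_iff_mem_items _ _ _ (PySem.Dict.nodup_keys_ofList _)] at h
  rw [pvItems_ofList _ (by rw [pvPairsFst]; exact hnd)] at h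
  obtain ⟨r, hr, heq⟩ := List.mem_map.mp h
  simp only [Prod.mk.injEq] at heq
  obtain ⟨⟨h1, h2⟩, h3⟩ := heq
  have : r = (tc, ac, a) := by
    rw [← h1, ← h2, ← h3]
  rw [← this]
  exact hr

-- membership in a dict built from a list comes from the list
lemma pvMemUpdateItems {κ ν : Type} [BEq κ] [LawfulBEq κ] :
    ∀ (l : List (κ × ν)) (d : PySem.Dict κ ν) (p : κ × ν),
    p ∈ (d.update l).items → p ∈ d.items ∨ p ∈ l := by
  intro l
  induction l with
  | nil => intro d p h; exact Or.inl h
  | cons q l' ih =>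
    intro d p h
    have h' := ih (d.insert q.1 q.2) p h
    rcases h' with h' | h'
    · rcases (PySem.Dict.mem_items_insert _ _ _ _).mp h' with h'' | h''
      · exact Or.inr (by rw [h'']; exact List.mem_cons_self)
      · exact Or.inl h''.1
    · exact Or.inr (List.mem_cons_of_mem _ h')

lemma pvMemOfListItems {κ ν : Type} [BEq κ] [LawfulBEq κ]
    (l : List (κ × ν)) (p : κ × ν) (h : p ∈ (PySem.Dict.ofList l).items) : p ∈ l := by
  rcases pvMemUpdateItems l PySem.Dict.empty p h with h' | h'
  · exact absurd h' (by simp [PySem.Dict.empty])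
  · exact h'

-- key distinctness of the flat rule list
lemma pvRulesKeysNodup (m : List (String × List (String × String))) :
    ((pvRules m).map (fun r => (r.1, r.2.1))).Nodup := by
  unfold pvRules
  rw [List.map_flatMap]
  rw [List.nodup_flatMap]
  constructor
  · intro tp _
    rw [List.map_map]
    have : ((PySem.Dict.ofList tp.2).items.map
        ((fun r : String × String × String => (r.1, r.2.1)) ∘ (fun ap => (tp.1, ap.1, ap.2))))
        = ((PySem.Dict.ofList tp.2).items.map Prod.fst).map (fun k => (tp.1, k)) := by
      rw [List.map_map]; rfl
    rw [this]
    exact (PySem.Dict.nodup_keys_ofList tp.2).map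
      (fun a b hab => by simpa using congrArg Prod.snd hab)
  · have hkeys : ((PySem.Dict.ofList m).items.map Prod.fst).Nodup :=
      PySem.Dict.nodup_keys_ofList m
    have hpw : (PySem.Dict.ofList m).items.Pairwise (fun a b => a.1 ≠ b.1) := by
      rw [← List.pairwise_map (f := Prod.fst) (R := (· ≠ ·))]
      exact hkeys
    refine hpw.imp ?_
    intro a b hab x hx1 hx2
    simp only [List.map_map, List.mem_map, Function.comp] at hx1 hx2
    obtain ⟨p1, _, rfl⟩ := hx1
    obtain ⟨p2, _, hp2⟩ := hx2
    exact hab (by simpa using (congrArg Prod.fst hp2).symm)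

-- Pre_ gives cleanliness of every flattened rule
lemma pvCleanId_prop (x : String) (h : pvCleanId x = true) :
    ∀ c ∈ x.toList, c ≠ '&' ∧ c ≠ '/' ∧ c ≠ '#' := by
  intro c hc
  have := (List.all_eq_true.mp h) c hc
  simp at this
  refine ⟨?_, ?_, ?_⟩ <;> simp_all

lemma pvPreClean (m : List (String × List (String × String)))
    (hpre : (m.all (fun tp =>
      pvCleanId tp.1 && tp.2.all (fun ap => pvCleanId ap.1 && pvCleanAnchor ap.2))) = true) :
    ∀ r ∈ pvRules m, pvCleanR r := by
  intro r hr
  unfold pvRules at hr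
  obtain ⟨tp, htp, hr2⟩ := List.mem_flatMap.mp hr
  obtain ⟨ap, hap, rfl⟩ := List.mem_map.mp hr2
  have htpm : tp ∈ m := pvMemOfListItems m tp htp
  have hapm : ap ∈ tp.2 := pvMemOfListItems tp.2 ap hap
  have hall := List.all_eq_true.mp hpre tp htpm
  rw [Bool.and_eq_true] at hall
  have hinner := List.all_eq_true.mp hall.2 ap hapm
  rw [Bool.and_eq_true] at hinner
  refine ⟨pvCleanId_prop _ hall.1, pvCleanId_prop _ hinner.1, ?_⟩
  intro hmem
  have := (List.all_eq_true.mp hinner.2) '/' hmem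
  simp at this

-- ===== the main equivalence: the fold of replaces IS the single scan =====
lemma pvMain (L : List (String × String × String)) (hcl : ∀ r ∈ L, pvCleanR r)
    (hnd : (L.map (fun r => (r.1, r.2.1))).Nodup) :
    ∀ (n : Nat) (s : List Char), s.length ≤ n →
    List.foldl pvStep s L = pvScan (PySem.Dict.ofList (pvPairs L)) s := by
  intro n
  induction n with
  | zero =>
    intro s hs
    have : s = [] := List.eq_nil_of_length_eq_zero (Nat.le_zero.mp hs)
    subst this
    rw [pvFold_nil, pvScan]
  | succ n ih =>
    intro s hs
    cases s with
    | nil => rw [pvFold_nil, pvScan]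
    | cons c t =>
      by_cases hex : ∃ r, r ∈ L ∧ pvPat r.1.toList r.2.1.toList <+: (c :: t)
      · obtain ⟨r, hr, hpfx⟩ := hex
        obtain ⟨v, hv⟩ := hpfx
        rw [← hv]
        rw [pvFold_match L hcl hnd r hr v]
        rw [pvScan_match _ r.1 r.2.1 r.2.2 (pvCleanR_ampT (hcl r hr)) (pvCleanR_ampA (hcl r hr))
          (pvLook1 L hnd r hr) v]
        congr 1
        apply ih
        have hlen := congrArg List.length hv
        have hplen : 0 < (pvPat r.1.toList r.2.1.toList).length :=
          List.length_pos_of_ne_nil (pvPat_ne_nil _ _)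
        simp only [List.length_append, List.length_cons] at hlen
        simp only [List.length_cons] at hs
        omega
      · have hno : ∀ r ∈ L, ¬ pvPat r.1.toList r.2.1.toList <+: (c :: t) := by
          intro r hr hp
          exact hex ⟨r, hr, hp⟩
        rw [pvFold_nomatch L hcl c t hno]
        rw [pvScan_nomatch _ L (fun tc ac a h => pvLook2 L hnd tc ac a h) c t hno]
        rw [ih t (by simpa using Nat.le_of_succ_le_succ hs)]

-- ===== assembling the two ports =====
lemma pvStrFoldToList (L : List (String × String × String)) : ∀ (s : String),
    (List.foldl (fun h r => PySem.Str.replace h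
      ("/affichCodeArticle.do?cidTexte=" ++ r.2.1 ++ "&idArticle=" ++ r.1 ++ "&dateTexte=&categorieLien=cid")
      ("#" ++ r.2.2)) s L).toList = List.foldl pvStep s.toList L := by
  induction L with
  | nil => intro s; rfl
  | cons r L' ih =>
    intro s
    simp only [List.foldl_cons]
    rw [ih]
    have h1 : ("/affichCodeArticle.do?cidTexte=" ++ r.2.1 ++ "&idArticle=" ++ r.1 ++ "&dateTexte=&categorieLien=cid" : String).toList
        = pvPat r.1.toList r.2.1.toList := by
      simp only [String.toList_append]
      rfl
    have h2 : ("#" ++ r.2.2 : String).toList = '#' :: r.2.2.toList := by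
      simp only [String.toList_append]
      rfl
    have h3 : (PySem.Str.replace s
        ("/affichCodeArticle.do?cidTexte=" ++ r.2.1 ++ "&idArticle=" ++ r.1 ++ "&dateTexte=&categorieLien=cid")
        ("#" ++ r.2.2)).toList = pvStep s.toList r := by
      rw [PySem.Str.toList_replace, h1, h2]
      rfl
    rw [h3]

lemma pvA_eq (html : String) (m : List (String × List (String × String))) :
    clean_article_html html m
      = String.ofList (List.foldl pvStep (PySem.Str.replace html "<p></p>" "").toList (pvRules m)) := by
  have hflat : clean_article_html html m
      = List.foldl (fun h r => PySem.Str.replace h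
          ("/affichCodeArticle.do?cidTexte=" ++ r.2.1 ++ "&idArticle=" ++ r.1 ++ "&dateTexte=&categorieLien=cid")
          ("#" ++ r.2.2)) (PySem.Str.replace html "<p></p>" "") (pvRules m) := by
    unfold clean_article_html pvRules
    rw [List.foldl_flatMap]
    simp only [List.foldl_map]
  rw [hflat, ← pvStrFoldToList, String.ofList_toList]

-- ===== the no-URL case: both programs leave the cleaned html unchanged =====
lemma pvPRE_prefix_pat (tc ac : List Char) : pvPRE <+: pvPat tc ac := by
  refine ⟨ac ++ (pvMID ++ (tc ++ pvSUF)), ?_⟩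
  simp [pvPat, List.append_assoc]

lemma pvReplace_id (s p r : List Char) (hp : p ≠ []) (h : ∀ i, ¬ p <+: List.drop i s) :
    PySem.Chars.replace s p r = s := by
  induction s with
  | nil => exact pvReplace_nil p r hp
  | cons c t ih =>
    rw [pvReplace_cons_nomatch c t p r hp (by simpa using h 0)]
    rw [ih (fun i => by simpa [List.drop_succ_cons] using h (i + 1))]

lemma pvFold_id (L : List (String × String × String)) (s : List Char)
    (h : ∀ i, ¬ pvPRE <+: List.drop i s) : List.foldl pvStep s L = s := by
  induction L with
  | nil => rfl
  | cons r L' ih =>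
    have hstep : pvStep s r = s := by
      unfold pvStep
      apply pvReplace_id _ _ _ (pvPat_ne_nil _ _)
      intro i hp
      exact h i ((pvPRE_prefix_pat _ _).trans hp)
    simp only [List.foldl_cons, hstep, ih]

lemma pvScan_id (anch : PySem.Dict (String × String) String) (s : List Char)
    (h : ∀ i, ¬ pvPRE <+: List.drop i s) : pvScan anch s = s := by
  induction s with
  | nil => rw [pvScan]
  | cons c t ih =>
    rw [pvScan_cons]
    have hstart : ¬ PySem.Chars.startswith (c :: t) pvPRE = true := by
      rw [PySem.Chars.startswith_iff]
      simpa using h 0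
    rw [if_neg hstart, ih (fun i => by simpa [List.drop_succ_cons] using h (i + 1))]

lemma pvNoPre (html : String)
    (h : PySem.Str.isIn "/affichCodeArticle.do?cidTexte=" (PySem.Str.replace html "<p></p>" "") = false) :
    ∀ i, ¬ pvPRE <+: List.drop i (PySem.Str.replace html "<p></p>" "").toList := by
  intro i hp
  rw [PySem.Str.isIn_eq] at h
  have : ∃ j, ("/affichCodeArticle.do?cidTexte=" : String).toList
      <+: (PySem.Str.replace html "<p></p>" "").toList.drop j := ⟨i, hp⟩
  rw [PySem.Chars.exists_prefix_drop_iff_isIn] at this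
  rw [this] at h
  exact Bool.true_eq_false.mp h

-- ===== VERDICT (by name: the statement is the Claim_ definition above) =====
theorem clean_article_html_spec : Claim_equal_clean_article_html := by
  intro html m _ hpre
  unfold Spec_clean_article_html clean_article_html_alt
  rw [pvA_eq, pvAnchors_eq]
  rcases hpre with hclean | hnopre
  · congr 1
    exact pvMain (pvRules m) (pvPreClean m hclean) (pvRulesKeysNodup m)
      (PySem.Str.replace html "<p></p>" "").toList.length _ (le_refl _)
  · congr 1
    rw [pvFold_id _ _ (pvNoPre html hnopre), pvScan_id _ _ (pvNoPre html hnopre)]
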